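-- pv_equiv track=rewrite | github.com/Dhenz14/Hive-AI | scripts/audit_training_data.py | _extract_prose_context
-- ===== SOURCE A (Python) =====
-- def _extract_prose_context(output: str) -> str:
--     """Extract explanatory prose from output (non-code text).
--
--     Used to build understanding answers from existing generation outputs.
--     """
--     lines = output.split("\n")
--     prose_lines = []
--     in_code_block = False
--     for line in lines:
--         stripped = line.strip()
--         if stripped.startswith("```"):
--             in_code_block = not in_code_block
--             continue
--         if not in_code_block and stripped:
--             # Skip lines that look like pure code outside fences
--             if stripped.startswith(("def ", "fn ", "func ", "class ", "import ",
--                                     "#include", "pub ", "const ", "let ", "var ")):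
--                 continue
--             prose_lines.append(line)
--     return "\n".join(prose_lines).strip()
-- ===== SOURCE B (Python) =====
-- def _extract_prose_context(output: str) -> str:
--     """Fence-region decomposition: split the lines at ``` fence lines into
--     regions; even-indexed regions are outside code, keep their prose lines."""
--     prefixes = ("def ", "fn ", "func ", "class ", "import ",
--                 "#include", "pub ", "const ", "let ", "var ")
--     regions = []
--     current = []
--     for line in output.split("\n"):
--         if line.strip().startswith("```"):
--             regions.append(current)
--             current = []
--         else:
--             current.append(line)
--     regions.append(current)
--     kept = []
--     for i, region in enumerate(regions):
--         if i % 2 == 0: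
--             for line in region:
--                 s = line.strip()
--                 if s and not s.startswith(prefixes):
--                     kept.append(line)
--     return "\n".join(kept).strip()
-- ===== Notes on version B (the rewrite author's own statement) =====
-- stated objective: alternative
-- what changed: Replaces the per-line in_code_block toggle with a two-pass decomposition: first split the lines at ``` fence lines into regions, then keep prose lines only from even-indexed (outside-code) regions, discarding an unbalanced trailing region.
import Mathlib
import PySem

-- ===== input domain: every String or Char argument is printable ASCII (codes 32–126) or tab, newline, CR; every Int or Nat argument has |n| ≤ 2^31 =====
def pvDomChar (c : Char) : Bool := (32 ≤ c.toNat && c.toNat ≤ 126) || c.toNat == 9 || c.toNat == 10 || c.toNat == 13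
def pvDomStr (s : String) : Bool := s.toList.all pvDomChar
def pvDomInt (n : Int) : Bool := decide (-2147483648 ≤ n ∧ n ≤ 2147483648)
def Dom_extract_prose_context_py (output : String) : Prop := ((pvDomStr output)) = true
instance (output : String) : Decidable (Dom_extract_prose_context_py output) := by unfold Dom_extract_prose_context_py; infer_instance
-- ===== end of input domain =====

-- B replaces A's per-line code-block toggle with a fence-region split followed by a
-- filter over the even-indexed (outside-code) regions; alternative decomposition, same cost.

-- shared literal constants of both Pythons
def pvTicks : List Char := "```".toList
-- the tuple of code prefixes
def pvPrefixes : List (List Char) :=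
  ["def ".toList, "fn ".toList, "func ".toList, "class ".toList, "import ".toList,
   "#include".toList, "pub ".toList, "const ".toList, "let ".toList, "var ".toList]

-- ===== PORT A =====
-- loop body of A's single pass: state = (prose_lines, in_code_block)
def pvStepA (st : List (List Char) × Bool) (line : List Char) : List (List Char) × Bool :=
  let stripped := PySem.Chars.strip line
  if PySem.Chars.startswith stripped pvTicks then (st.1, !st.2)
  else if !st.2 && !stripped.isEmpty then
    if pvPrefixes.any (fun p => PySem.Chars.startswith stripped p) then st
    else (st.1 ++ [line], st.2)
  else st

def extract_prose_context_py (output : String) : String :=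
  let lines := PySem.Chars.splitOn output.toList ['\n']
  let st := lines.foldl pvStepA ([], false)
  String.ofList (PySem.Chars.strip (PySem.Chars.join ['\n'] st.1))

-- ===== PORT B =====
-- pass 1 loop body: state = (regions, current); a fence line closes the current region
def pvStepB (st : List (List (List Char)) × List (List Char)) (line : List Char) :
    List (List (List Char)) × List (List Char) :=
  if PySem.Chars.startswith (PySem.Chars.strip line) pvTicks then (st.1 ++ [st.2], [])
  else (st.1, st.2 ++ [line])

-- pass 2 inner loop body: keep a prose line
def pvStepKeep (acc : List (List Char)) (line : List Char) : List (List Char) :=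
  let s := PySem.Chars.strip line
  if !s.isEmpty && !(pvPrefixes.any (fun p => PySem.Chars.startswith s p)) then acc ++ [line]
  else acc

def extract_prose_context_py_alt (output : String) : String :=
  let lines := PySem.Chars.splitOn output.toList ['\n']
  let st := lines.foldl pvStepB ([], [])
  let regions := st.1 ++ [st.2]
  let kept := (PySem.List.enumerate regions 0).foldl
    (fun acc ir => if PySem.Int.mod ir.1 2 == 0 then ir.2.foldl pvStepKeep acc else acc) []
  String.ofList (PySem.Chars.strip (PySem.Chars.join ['\n'] kept))

-- ===== PRECONDITION & SPEC =====
def Spec_extract_prose_context_py (output : String) (out : String) : Prop := out = extract_prose_context_py_alt output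
instance (output : String) (out : String) : Decidable (Spec_extract_prose_context_py output out) := by unfold Spec_extract_prose_context_py; infer_instance

-- ===== CLAIM (what is proved, stated in full; the proofs are below) =====
def Claim_equal_extract_prose_context_py : Prop := ∀ (output : String), Dom_extract_prose_context_py output → Spec_extract_prose_context_py output (extract_prose_context_py output)

-- ===== LEMMAS AND PROOFS =====
def pvFence (line : List Char) : Bool :=
  PySem.Chars.startswith (PySem.Chars.strip line) pvTicks

def pvProse? (line : List Char) : Bool :=
  let s := PySem.Chars.strip line
  !s.isEmpty && !(pvPrefixes.any (fun p => PySem.Chars.startswith s p))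

-- reference recursion: the prose lines of `lines` starting in code-block state b
def pvSpecFold (lines : List (List Char)) (b : Bool) : List (List Char) :=
  match lines with
  | [] => []
  | l :: ls =>
    if pvFence l then pvSpecFold ls (!b)
    else if b then pvSpecFold ls b
    else (if pvProse? l then [l] else []) ++ pvSpecFold ls b

-- top-down view of B's region split
def pvRegionsRec : List (List Char) → List (List (List Char))
  | [] => [[]]
  | l :: ls =>
    if pvFence l then [] :: pvRegionsRec ls
    else
      match pvRegionsRec ls with
      | r :: rest => (l :: r) :: rest
      | [] => [[l]]

def pvConsHead (cur : List (List Char)) : List (List (List Char)) → List (List (List Char))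
  | [] => [cur]
  | r :: rest => (cur ++ r) :: rest

-- prose lines of the regions, keeping even (resp. odd) indexed regions when even = true (resp. false)
def pvPick (even : Bool) : List (List (List Char)) → List (List Char)
  | [] => []
  | r :: rest => (if even then r.filter pvProse? else []) ++ pvPick (!even) rest

theorem pvRegionsRec_ne_nil (ls : List (List Char)) : pvRegionsRec ls ≠ [] := by
  cases ls with
  | nil => simp [pvRegionsRec]
  | cons l ls =>
    simp only [pvRegionsRec]
    split
    · simp
    · cases h : pvRegionsRec ls <;> simp

theorem pvFoldA_fst (lines : List (List Char)) :
    ∀ (acc : List (List Char)) (b : Bool),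
      (lines.foldl pvStepA (acc, b)).1 = acc ++ pvSpecFold lines b := by
  induction lines with
  | nil => intro acc b; simp [pvSpecFold]
  | cons l ls ih =>
    intro acc b
    simp only [List.foldl_cons, pvSpecFold, pvStepA, pvFence, pvProse?]
    by_cases hf : PySem.Chars.startswith (PySem.Chars.strip l) pvTicks = true
    · simp [hf, ih]
    · simp only [hf, Bool.not_eq_true] at *
      cases b with
      | true => simp [ih]
      | false =>
        by_cases he : (PySem.Chars.strip l).isEmpty = true
        · simp [he, ih]
        · by_cases hp : pvPrefixes.any (fun p => PySem.Chars.startswith (PySem.Chars.strip l) p) = true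
          · simp [he, hp, ih]
          · simp only [Bool.not_eq_true] at he hp
            simp [he, hp, ih]

theorem pvFoldB_regions (lines : List (List Char)) :
    ∀ (rs : List (List (List Char))) (cur : List (List Char)),
      (lines.foldl pvStepB (rs, cur)).1 ++ [(lines.foldl pvStepB (rs, cur)).2]
        = rs ++ pvConsHead cur (pvRegionsRec lines) := by
  induction lines with
  | nil => intro rs cur; simp [pvRegionsRec, pvConsHead]
  | cons l ls ih =>
    intro rs cur
    simp only [List.foldl_cons, pvStepB, pvRegionsRec, pvFence]
    by_cases hf : PySem.Chars.startswith (PySem.Chars.strip l) pvTicks = true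
    · simp only [hf, if_true, ih]
      cases h : pvRegionsRec ls with
      | nil => exact absurd h (pvRegionsRec_ne_nil ls)
      | cons r rest => simp [pvConsHead]
    · simp only [hf, ih]
      cases h : pvRegionsRec ls with
      | nil => exact absurd h (pvRegionsRec_ne_nil ls)
      | cons r rest => simp [pvConsHead]

theorem pvFoldKeep (r : List (List Char)) :
    ∀ acc : List (List Char), r.foldl pvStepKeep acc = acc ++ r.filter pvProse? := by
  induction r with
  | nil => intro acc; simp
  | cons x xs ih =>
    intro acc
    simp only [List.foldl_cons, pvStepKeep, List.filter_cons, pvProse?]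
    by_cases h : (!(PySem.Chars.strip x).isEmpty &&
        !(pvPrefixes.any (fun p => PySem.Chars.startswith (PySem.Chars.strip x) p))) = true
    · simp [h, ih]
    · simp [h, ih]

theorem pvModSucc (n : Int) :
    (PySem.Int.mod (n + 1) 2 == 0) = !(PySem.Int.mod n 2 == 0) := by
  rw [PySem.Int.mod_eq_emod_of_pos (by norm_num), PySem.Int.mod_eq_emod_of_pos (by norm_num)]
  by_cases h : n % 2 = 0
  · have : (n + 1) % 2 = 1 := by omega
    simp [h, this]
  · have h1 : n % 2 = 1 := by omega
    have : (n + 1) % 2 = 0 := by omega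
    simp [h1, this]

theorem pvFoldEnum (regions : List (List (List Char))) :
    ∀ (n : Int) (acc : List (List Char)),
      ((PySem.List.enumerate regions n).foldl
        (fun acc ir => if PySem.Int.mod ir.1 2 == 0 then ir.2.foldl pvStepKeep acc else acc) acc)
        = acc ++ pvPick (PySem.Int.mod n 2 == 0) regions := by
  induction regions with
  | nil => intro n acc; simp [pvPick]
  | cons r rest ih =>
    intro n acc
    rw [PySem.List.enumerate_cons, List.foldl_cons, ih, pvModSucc]
    by_cases h : (PySem.Int.mod n 2 == 0) = true
    · simp only [pvPick, h, if_true, Bool.not_true, pvFoldKeep, List.append_assoc]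
    · simp only [Bool.not_eq_true] at h
      simp only [pvPick, h, Bool.false_eq_true, if_false, Bool.not_false, List.nil_append]

theorem pvPick_regionsRec (lines : List (List Char)) :
    pvPick true (pvRegionsRec lines) = pvSpecFold lines false ∧
    pvPick false (pvRegionsRec lines) = pvSpecFold lines true := by
  induction lines with
  | nil => simp [pvRegionsRec, pvPick, pvSpecFold]
  | cons l ls ih =>
    cases hf : pvFence l with
    | true => simp [pvRegionsRec, pvSpecFold, hf, pvPick, ih.1, ih.2]
    | false =>
      cases h : pvRegionsRec ls with
      | nil => exact absurd h (pvRegionsRec_ne_nil ls)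
      | cons r rest =>
        rw [h] at ih
        simp only [pvRegionsRec, pvSpecFold, hf, h, Bool.false_eq_true, if_false, pvPick,
          if_true, Bool.not_true, Bool.not_false, List.filter_cons, List.nil_append] at ih ⊢
        refine ⟨?_, ih.2⟩
        by_cases hp : pvProse? l = true
        · simp [hp, ← ih.1]
        · simp only [Bool.not_eq_true] at hp
          simp [hp, ← ih.1]

-- ===== VERDICT (by name: the statement is the Claim_ definition above) =====
theorem extract_prose_context_py_spec : Claim_equal_extract_prose_context_py := by
  intro output _
  unfold Spec_extract_prose_context_py extract_prose_context_py extract_prose_context_py_alt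
  dsimp only
  have hA := pvFoldA_fst (PySem.Chars.splitOn output.toList ['\n']) [] false
  have hB := pvFoldB_regions (PySem.Chars.splitOn output.toList ['\n']) [] []
  simp only [List.nil_append] at hA hB
  have hregs : (((PySem.Chars.splitOn output.toList ['\n']).foldl pvStepB ([], [])).1 ++
      [((PySem.Chars.splitOn output.toList ['\n']).foldl pvStepB ([], [])).2])
      = pvRegionsRec (PySem.Chars.splitOn output.toList ['\n']) := by
    rw [hB]
    cases h : pvRegionsRec (PySem.Chars.splitOn output.toList ['\n']) with
    | nil => exact absurd h (pvRegionsRec_ne_nil _)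
    | cons r rest => simp [pvConsHead]
  rw [hA, hregs, pvFoldEnum]
  have hm : (PySem.Int.mod 0 2 == 0) = true := by decide
  rw [hm, (pvPick_regionsRec _).1]
  simp
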